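-- pv_equiv track=rewrite | github.com/nirholas/agenti | packages/tools/lyra-intel/src/forensics/complexity_analyzer.py | _extract_block
-- ===== SOURCE A (Python) =====
-- def _extract_block(content: str) -> str:
--     """Extract a code block enclosed in braces."""
--     depth = 0
--     started = False
--     end_pos = 0
--
--     for i, char in enumerate(content):
--         if char == "{":
--             depth += 1
--             started = True
--         elif char == "}":
--             depth -= 1
--             if started and depth == 0:
--                 end_pos = i
--                 break
--
--     return content[:end_pos] if end_pos else content[:200]
-- ===== SOURCE B (Python) =====
-- def _extract_block(content: str) -> str:
--     """Extract a code block enclosed in braces.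
--
--     Hops directly between brace characters with str.find instead of
--     scanning every character, keeping a running balance of open braces.
--     """
--     balance = 0
--     seen_open = False
--     pos = 0
--     while True:
--         o = content.find("{", pos)
--         c = content.find("}", pos)
--         if c == -1 and o == -1:
--             return content[:200]
--         if o != -1 and (c == -1 or o < c):
--             balance += 1
--             seen_open = True
--             pos = o + 1
--         else:
--             balance -= 1
--             if seen_open and balance == 0:
--                 return content[:c]
--             pos = c + 1
-- ===== Notes on version B (the rewrite author's own statement) =====
-- stated objective: faster
-- what changed: A scans every character in a Python-level for loop carrying (depth, started, end_pos) state; B instead hops directly from brace to brace with str.find(sub, pos) in a while loop, updating a running balance only at brace positions and returning immediately at the balancing close brace.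
import Mathlib
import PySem

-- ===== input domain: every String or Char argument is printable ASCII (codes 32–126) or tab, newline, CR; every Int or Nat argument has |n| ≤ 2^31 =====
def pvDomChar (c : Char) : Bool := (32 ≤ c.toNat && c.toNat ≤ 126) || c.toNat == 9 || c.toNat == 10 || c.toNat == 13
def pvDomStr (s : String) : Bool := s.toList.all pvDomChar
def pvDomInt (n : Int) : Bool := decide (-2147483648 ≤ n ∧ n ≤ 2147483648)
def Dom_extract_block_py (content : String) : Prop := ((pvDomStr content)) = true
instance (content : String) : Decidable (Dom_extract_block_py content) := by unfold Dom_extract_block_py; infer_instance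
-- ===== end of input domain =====

-- B replaces A's per-character scan by a loop that hops between brace characters
-- with str.find, keeping a running balance; same return value, alternative mechanism.

-- ===== PORT A =====
-- A's for-loop with (depth, started, end_pos) state and break; returns final end_pos
def pvLoopA : List Char → Nat → Int → Bool → Nat → Nat
  | [], _, _, _, endPos => endPos
  | c :: rest, i, depth, started, endPos =>
    if c = '{' then pvLoopA rest (i + 1) (depth + 1) true endPos
    else if c = '}' then
      if started = true ∧ depth - 1 = 0 then i
      else pvLoopA rest (i + 1) (depth - 1) started endPos
    else pvLoopA rest (i + 1) depth started endPos

def extract_block_py (content : String) : String :=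
  let endPos := pvLoopA content.toList 0 0 false 0
  if endPos ≠ 0 then String.ofList (PySem.List.slice content.toList none (some (endPos : Int)))
  else String.ofList (PySem.List.slice content.toList none (some 200))

-- ===== PORT B =====
-- a found occurrence of a one-char pattern lies at an index ≥ pos and < length
-- (justifies termination of pvHop; the port cites it in decreasing_by)
theorem pvFindFrom_bounds (cs sub : List Char) (pos : Nat) (hpos : pos ≤ cs.length)
    (hsub : sub ≠ []) (h : PySem.Chars.findFrom cs sub (pos : Int) ≠ -1) :
    pos ≤ (PySem.Chars.findFrom cs sub (pos : Int)).toNat ∧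
      (PySem.Chars.findFrom cs sub (pos : Int)).toNat < cs.length := by
  obtain ⟨hle, hpre, -⟩ := PySem.Chars.findFrom_natCast_spec cs sub pos hpos h
  have h1 : pos ≤ (PySem.Chars.findFrom cs sub (pos : Int)).toNat := by omega
  refine ⟨h1, ?_⟩
  by_contra hge
  have : List.drop (PySem.Chars.findFrom cs sub (pos : Int)).toNat cs = [] :=
    List.drop_eq_nil_of_le (by omega)
  rw [this] at hpre
  exact hsub (List.prefix_nil.mp hpre)

-- Source B's 'while True' loop: hop to the next brace via find, update the balance
def pvHop (cs : List Char) (pos : Nat) (hpos : pos ≤ cs.length)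
    (balance : Int) (seenOpen : Bool) : List Char :=
  let o := PySem.Chars.findFrom cs ['{'] (pos : Int)
  let c := PySem.Chars.findFrom cs ['}'] (pos : Int)
  if h1 : c = -1 ∧ o = -1 then PySem.List.slice cs none (some 200)
  else if h2 : o ≠ -1 ∧ (c = -1 ∨ o < c) then
    pvHop cs (o.toNat + 1) (pvFindFrom_bounds cs ['{'] pos hpos (by simp) h2.1).2 (balance + 1) true
  else
    if seenOpen = true ∧ balance - 1 = 0 then PySem.List.slice cs none (some c)
    else
      have hc : c ≠ -1 := by
        intro hcc
        exact (if hoo : o = -1 then h1 ⟨hcc, hoo⟩ else h2 ⟨hoo, Or.inl hcc⟩)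
      pvHop cs (c.toNat + 1) (pvFindFrom_bounds cs ['}'] pos hpos (by simp) hc).2 (balance - 1) seenOpen
termination_by cs.length - pos
decreasing_by
  · have := (pvFindFrom_bounds cs ['{'] pos hpos (by simp) h2.1)
    omega
  · have := (pvFindFrom_bounds cs ['}'] pos hpos (by simp) hc)
    omega

def extract_block_py_alt (content : String) : String :=
  String.ofList (pvHop content.toList 0 (Nat.zero_le _) 0 false)

-- ===== PRECONDITION & SPEC =====
def Spec_extract_block_py (content : String) (out : String) : Prop := out = extract_block_py_alt content
instance (content : String) (out : String) : Decidable (Spec_extract_block_py content out) := by unfold Spec_extract_block_py; infer_instance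

-- ===== CLAIM (what is proved, stated in full; the proofs are below) =====
def Claim_equal_extract_block_py : Prop := ∀ (content : String), Dom_extract_block_py content → Spec_extract_block_py content (extract_block_py content)

-- ===== LEMMAS AND PROOFS =====

-- A's loop as an Option: some i on break, none when the loop runs off the end
def pvBreak : List Char → Nat → Int → Bool → Option Nat
  | [], _, _, _ => none
  | c :: rest, i, depth, started =>
    if c = '{' then pvBreak rest (i + 1) (depth + 1) true
    else if c = '}' then
      if started = true ∧ depth - 1 = 0 then some i
      else pvBreak rest (i + 1) (depth - 1) started
    else pvBreak rest (i + 1) depth started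

theorem pvLoopA_eq_break (cs : List Char) :
    ∀ (i : Nat) (d : Int) (st : Bool), pvLoopA cs i d st 0 = (pvBreak cs i d st).getD 0 := by
  induction cs with
  | nil => intro i d st; rfl
  | cons c rest ih =>
    intro i d st
    by_cases hc : c = '{'
    · simp [pvLoopA, pvBreak, hc, ih]
    · by_cases hb : c = '}'
      · by_cases hz : st = true ∧ d - 1 = 0
        · simp [pvLoopA, pvBreak, hb, hz]
        · simp [pvLoopA, pvBreak, hb, hz, ih]
      · simp [pvLoopA, pvBreak, hc, hb, ih]

theorem pvBreak_ge (cs : List Char) :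
    ∀ (i : Nat) (d : Int) (st : Bool) (j : Nat), pvBreak cs i d st = some j → i ≤ j := by
  induction cs with
  | nil => intro i d st j h; simp [pvBreak] at h
  | cons c rest ih =>
    intro i d st j h
    by_cases hc : c = '{'
    · simp [pvBreak, hc] at h; exact Nat.le_of_succ_le (ih _ _ _ _ h)
    · by_cases hb : c = '}'
      · by_cases hz : st = true ∧ d - 1 = 0
        · simp [pvBreak, hc, hb, hz] at h; omega
        · simp [pvBreak, hc, hb, hz] at h; exact Nat.le_of_succ_le (ih _ _ _ _ h)
      · simp [pvBreak, hc, hb] at h; exact Nat.le_of_succ_le (ih _ _ _ _ h)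

theorem pvBreak_false_lt (cs : List Char) :
    ∀ (i : Nat) (d : Int) (j : Nat), pvBreak cs i d false = some j → i < j := by
  induction cs with
  | nil => intro i d j h; simp [pvBreak] at h
  | cons c rest ih =>
    intro i d j h
    by_cases hc : c = '{'
    · simp [pvBreak, hc] at h
      exact Nat.lt_of_succ_le (pvBreak_ge _ _ _ _ _ h)
    · by_cases hb : c = '}'
      · simp [pvBreak, hc, hb] at h
        exact Nat.lt_of_succ_lt (ih _ _ _ h)
      · simp [pvBreak, hc, hb] at h
        exact Nat.lt_of_succ_lt (ih _ _ _ h)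

-- a brace-free prefix is skipped, only the index advances
theorem pvBreak_skip (pre : List Char) (hpre : ∀ a ∈ pre, a ≠ '{' ∧ a ≠ '}') :
    ∀ (rest : List Char) (i : Nat) (d : Int) (st : Bool),
      pvBreak (pre ++ rest) i d st = pvBreak rest (i + pre.length) d st := by
  induction pre with
  | nil => intro rest i d st; simp
  | cons a pre ih =>
    intro rest i d st
    obtain ⟨ha1, ha2⟩ := hpre a List.mem_cons_self
    have hp : ∀ b ∈ pre, b ≠ '{' ∧ b ≠ '}' := fun b hb => hpre b (List.mem_cons_of_mem _ hb)
    rw [List.cons_append]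
    rw [show pvBreak (a :: (pre ++ rest)) i d st = pvBreak (pre ++ rest) (i + 1) d st by
      simp [pvBreak, ha1, ha2]]
    rw [ih hp]
    congr 1
    simp
    omega

theorem prefix_drop_iff (a : Char) (l : List Char) (i : Nat) (hi : i < l.length) :
    ([a] <+: l.drop i) ↔ l[i] = a := by
  rw [List.drop_eq_getElem_cons hi]
  constructor
  · intro h
    exact ((List.cons_prefix_cons.mp h).1).symm
  · intro h
    exact List.cons_prefix_cons.mpr ⟨h.symm, List.nil_prefix⟩

theorem singleton_infix_iff_mem (a : Char) (l : List Char) : [a] <:+: l ↔ a ∈ l := by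
  constructor
  · intro h; exact h.subset (List.mem_singleton_self a)
  · intro h
    obtain ⟨s, t, hst⟩ := List.append_of_mem h
    exact ⟨s, t, by simp [hst]⟩

-- a prefix of a later tail is an infix of an earlier tail
theorem prefix_drop_infix_drop (a : Char) (l : List Char) (pos i : Nat) (hpi : pos ≤ i)
    (h : [a] <+: l.drop i) : [a] <:+: l.drop pos := by
  have hdd : l.drop i = List.drop (i - pos) (l.drop pos) := by
    rw [List.drop_drop]
    congr 1
    omega
  rw [hdd] at h
  exact h.isInfix.trans (List.drop_suffix _ _).isInfix

-- the characters strictly between pos and m are brace-free when neither pattern occurs there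
theorem pvMid_braceFree (cs : List Char) (pos m : Nat) (hpm : pos ≤ m) (hml : m ≤ cs.length)
    (h : ∀ i, pos ≤ i → i < m → ¬ ([('{' : Char)] <+: cs.drop i) ∧ ¬ ([('}' : Char)] <+: cs.drop i)) :
    ∀ a ∈ (cs.drop pos).take (m - pos), a ≠ '{' ∧ a ≠ '}' := by
  intro a ha
  obtain ⟨t, ht, hget⟩ := List.mem_take_iff_getElem.mp ha
  have htm : t < m - pos := by omega
  have htl : pos + t < cs.length := by omega
  have hgd : (cs.drop pos)[t]'(by simp; omega) = cs[pos + t] := by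
    rw [List.getElem_drop]
  obtain ⟨h1, h2⟩ := h (pos + t) (by omega) (by omega)
  constructor
  · intro hcon
    exact h1 ((prefix_drop_iff '{' cs (pos + t) htl).mpr (by rw [← hgd, hget, hcon]))
  · intro hcon
    exact h2 ((prefix_drop_iff '}' cs (pos + t) htl).mpr (by rw [← hgd, hget, hcon]))

-- decomposition of the tail at the next brace position m
theorem pvDrop_decomp (cs : List Char) (pos m : Nat) (hpm : pos ≤ m) :
    cs.drop pos = (cs.drop pos).take (m - pos) ++ cs.drop m := by
  conv_lhs => rw [← List.take_append_drop (m - pos) (cs.drop pos)]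
  congr 1
  rw [List.drop_drop]
  congr 1
  omega

theorem pvMid_length (cs : List Char) (pos m : Nat) (hpm : pos ≤ m) (hml : m ≤ cs.length) :
    ((cs.drop pos).take (m - pos)).length = m - pos := by
  simp
  omega

-- STEP LEMMA (open): when the next brace after pos is '{' at index o,
-- A's scan from pos reduces to the scan from o+1 with depth+1 and started
theorem pvOpen_step (cs : List Char) (pos : Nat) (hpos : pos ≤ cs.length)
    (hone : PySem.Chars.findFrom cs ['{'] (pos : Int) ≠ -1)
    (hfirst : PySem.Chars.findFrom cs ['}'] (pos : Int) = -1 ∨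
      PySem.Chars.findFrom cs ['{'] (pos : Int) < PySem.Chars.findFrom cs ['}'] (pos : Int))
    (d : Int) (st : Bool) :
    pvBreak (cs.drop pos) pos d st =
      pvBreak (cs.drop ((PySem.Chars.findFrom cs ['{'] (pos : Int)).toNat + 1))
        ((PySem.Chars.findFrom cs ['{'] (pos : Int)).toNat + 1) (d + 1) true := by
  obtain ⟨hle, hpre, hmin⟩ := PySem.Chars.findFrom_natCast_spec cs ['{'] pos hpos hone
  obtain ⟨hpm, hml⟩ := pvFindFrom_bounds cs ['{'] pos hpos (by simp) hone
  set m := (PySem.Chars.findFrom cs ['{'] (pos : Int)).toNat with hm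
  have hopen : cs[m] = '{' := (prefix_drop_iff '{' cs m hml).mp hpre
  have hdm : cs.drop m = '{' :: cs.drop (m + 1) := by
    rw [List.drop_eq_getElem_cons hml, hopen]
  have hseg : ∀ i, pos ≤ i → i < m →
      ¬ ([('{' : Char)] <+: cs.drop i) ∧ ¬ ([('}' : Char)] <+: cs.drop i) := by
    intro i hi1 hi2
    refine ⟨hmin i hi1 hi2, ?_⟩
    rcases hfirst with hcn | hlt
    · intro hcon
      exact ((PySem.Chars.findFrom_natCast_eq_neg_one_iff cs ['}'] pos hpos).mp hcn)
        (prefix_drop_infix_drop '}' cs pos i hi1 hcon)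
    · have hcne : PySem.Chars.findFrom cs ['}'] (pos : Int) ≠ -1 := by omega
      obtain ⟨-, -, hminc⟩ := PySem.Chars.findFrom_natCast_spec cs ['}'] pos hpos hcne
      refine hminc i hi1 ?_
      omega
  rw [pvDrop_decomp cs pos m hpm, pvBreak_skip _ (pvMid_braceFree cs pos m hpm (by omega) hseg),
    pvMid_length cs pos m hpm (by omega), hdm]
  rw [show pos + (m - pos) = m by omega]
  simp [pvBreak]

-- STEP LEMMA (close): when the next brace after pos is '}' at index c,
-- A's scan from pos reaches that '}' with unchanged state
theorem pvClose_step (cs : List Char) (pos : Nat) (hpos : pos ≤ cs.length)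
    (hcne : PySem.Chars.findFrom cs ['}'] (pos : Int) ≠ -1)
    (hfirst : PySem.Chars.findFrom cs ['{'] (pos : Int) = -1 ∨
      PySem.Chars.findFrom cs ['}'] (pos : Int) ≤ PySem.Chars.findFrom cs ['{'] (pos : Int))
    (d : Int) (st : Bool) :
    pvBreak (cs.drop pos) pos d st =
      pvBreak ('}' :: cs.drop ((PySem.Chars.findFrom cs ['}'] (pos : Int)).toNat + 1))
        ((PySem.Chars.findFrom cs ['}'] (pos : Int)).toNat) d st := by
  obtain ⟨hle, hpre, hmin⟩ := PySem.Chars.findFrom_natCast_spec cs ['}'] pos hpos hcne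
  obtain ⟨hpm, hml⟩ := pvFindFrom_bounds cs ['}'] pos hpos (by simp) hcne
  set m := (PySem.Chars.findFrom cs ['}'] (pos : Int)).toNat with hm
  have hclose : cs[m] = '}' := (prefix_drop_iff '}' cs m hml).mp hpre
  have hdm : cs.drop m = '}' :: cs.drop (m + 1) := by
    rw [List.drop_eq_getElem_cons hml, hclose]
  have hseg : ∀ i, pos ≤ i → i < m →
      ¬ ([('{' : Char)] <+: cs.drop i) ∧ ¬ ([('}' : Char)] <+: cs.drop i) := by
    intro i hi1 hi2
    refine ⟨?_, hmin i hi1 hi2⟩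
    rcases hfirst with hon | hle'
    · intro hcon
      exact ((PySem.Chars.findFrom_natCast_eq_neg_one_iff cs ['{'] pos hpos).mp hon)
        (prefix_drop_infix_drop '{' cs pos i hi1 hcon)
    · have hone : PySem.Chars.findFrom cs ['{'] (pos : Int) ≠ -1 := by omega
      obtain ⟨-, hpreo, hmino⟩ := PySem.Chars.findFrom_natCast_spec cs ['{'] pos hpos hone
      obtain ⟨-, hmlo⟩ := pvFindFrom_bounds cs ['{'] pos hpos (by simp) hone
      have hne : (PySem.Chars.findFrom cs ['{'] (pos : Int)).toNat ≠ m := by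
        intro he
        have hgeto := (prefix_drop_iff '{' cs m (he ▸ hmlo)).mp (he ▸ hpreo)
        exact absurd (hclose.symm.trans hgeto) (by decide)
      refine hmino i hi1 ?_
      omega
  rw [pvDrop_decomp cs pos m hpm, pvBreak_skip _ (pvMid_braceFree cs pos m hpm (by omega) hseg),
    pvMid_length cs pos m hpm (by omega), hdm]
  congr 1
  omega

-- MAIN INVARIANT: the hopping loop computes exactly what A's scan (as pvBreak) breaks at
theorem pvHop_eq_break (cs : List Char) (pos : Nat) (hpos : pos ≤ cs.length)
    (d : Int) (st : Bool) :
    pvHop cs pos hpos d st =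
      match pvBreak (cs.drop pos) pos d st with
      | some j => PySem.List.slice cs none (some (j : Int))
      | none => PySem.List.slice cs none (some 200) := by
  induction pos, hpos, d, st using pvHop.induct with
  | case1 pos hpos d st o c h1 =>
    have h1' : PySem.Chars.findFrom cs ['}'] (pos : Int) = -1 ∧
        PySem.Chars.findFrom cs ['{'] (pos : Int) = -1 := h1
    have ho : ¬ (['{'] <:+: cs.drop pos) :=
      (PySem.Chars.findFrom_natCast_eq_neg_one_iff cs ['{'] pos hpos).mp h1'.2
    have hcc : ¬ (['}'] <:+: cs.drop pos) :=
      (PySem.Chars.findFrom_natCast_eq_neg_one_iff cs ['}'] pos hpos).mp h1'.1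
    have hfree : ∀ a ∈ cs.drop pos, a ≠ '{' ∧ a ≠ '}' := by
      intro a ha
      constructor
      · intro hcon; exact ho ((singleton_infix_iff_mem '{' _).mpr (hcon ▸ ha))
      · intro hcon; exact hcc ((singleton_infix_iff_mem '}' _).mpr (hcon ▸ ha))
    have hbr : pvBreak (cs.drop pos) pos d st = none := by
      rw [show cs.drop pos = cs.drop pos ++ [] by simp, pvBreak_skip _ hfree]
      rfl
    rw [pvHop, dif_pos h1', hbr]
  | case2 pos hpos d st o c h1 h2 ih =>
    have h1' : ¬ (PySem.Chars.findFrom cs ['}'] (pos : Int) = -1 ∧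
        PySem.Chars.findFrom cs ['{'] (pos : Int) = -1) := h1
    have h2' : PySem.Chars.findFrom cs ['{'] (pos : Int) ≠ -1 ∧
        (PySem.Chars.findFrom cs ['}'] (pos : Int) = -1 ∨
          PySem.Chars.findFrom cs ['{'] (pos : Int) < PySem.Chars.findFrom cs ['}'] (pos : Int)) := h2
    rw [pvHop, dif_neg h1', dif_pos h2']
    rw [pvOpen_step cs pos hpos h2'.1 h2'.2 d st]
    exact ih
  | case3 pos hpos d st o c h1 h2 hret =>
    have h1' : ¬ (PySem.Chars.findFrom cs ['}'] (pos : Int) = -1 ∧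
        PySem.Chars.findFrom cs ['{'] (pos : Int) = -1) := h1
    have h2' : ¬ (PySem.Chars.findFrom cs ['{'] (pos : Int) ≠ -1 ∧
        (PySem.Chars.findFrom cs ['}'] (pos : Int) = -1 ∨
          PySem.Chars.findFrom cs ['{'] (pos : Int) < PySem.Chars.findFrom cs ['}'] (pos : Int))) := h2
    have hcne : PySem.Chars.findFrom cs ['}'] (pos : Int) ≠ -1 := by
      intro hcc
      exact (if hoo : PySem.Chars.findFrom cs ['{'] (pos : Int) = -1 then h1' ⟨hcc, hoo⟩
        else h2' ⟨hoo, Or.inl hcc⟩)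
    have hfirst : PySem.Chars.findFrom cs ['{'] (pos : Int) = -1 ∨
        PySem.Chars.findFrom cs ['}'] (pos : Int) ≤ PySem.Chars.findFrom cs ['{'] (pos : Int) := by
      by_cases hon : PySem.Chars.findFrom cs ['{'] (pos : Int) = -1
      · exact Or.inl hon
      · refine Or.inr ?_
        have hno : ¬ (PySem.Chars.findFrom cs ['}'] (pos : Int) = -1 ∨
            PySem.Chars.findFrom cs ['{'] (pos : Int) < PySem.Chars.findFrom cs ['}'] (pos : Int)) :=
          fun h => h2' ⟨hon, h⟩
        push_neg at hno
        omega
    have hnn : 0 ≤ PySem.Chars.findFrom cs ['}'] (pos : Int) := by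
      obtain ⟨hle, -, -⟩ := PySem.Chars.findFrom_natCast_spec cs ['}'] pos hpos hcne
      omega
    rw [pvHop, dif_neg h1', dif_neg h2', if_pos hret]
    rw [pvClose_step cs pos hpos hcne hfirst d st]
    rw [show pvBreak ('}' :: cs.drop ((PySem.Chars.findFrom cs ['}'] (pos : Int)).toNat + 1))
        ((PySem.Chars.findFrom cs ['}'] (pos : Int)).toNat) d st
        = some (PySem.Chars.findFrom cs ['}'] (pos : Int)).toNat by
      simp [pvBreak, hret]]
    show PySem.List.slice cs none (some (PySem.Chars.findFrom cs ['}'] (pos : Int)))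
        = PySem.List.slice cs none (some ((PySem.Chars.findFrom cs ['}'] (pos : Int)).toNat : Int))
    rw [Int.toNat_of_nonneg hnn]
  | case4 pos hpos d st o c h1 h2 hret hc ih =>
    have h1' : ¬ (PySem.Chars.findFrom cs ['}'] (pos : Int) = -1 ∧
        PySem.Chars.findFrom cs ['{'] (pos : Int) = -1) := h1
    have h2' : ¬ (PySem.Chars.findFrom cs ['{'] (pos : Int) ≠ -1 ∧
        (PySem.Chars.findFrom cs ['}'] (pos : Int) = -1 ∨
          PySem.Chars.findFrom cs ['{'] (pos : Int) < PySem.Chars.findFrom cs ['}'] (pos : Int))) := h2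
    have hcne : PySem.Chars.findFrom cs ['}'] (pos : Int) ≠ -1 := hc
    have hfirst : PySem.Chars.findFrom cs ['{'] (pos : Int) = -1 ∨
        PySem.Chars.findFrom cs ['}'] (pos : Int) ≤ PySem.Chars.findFrom cs ['{'] (pos : Int) := by
      by_cases hon : PySem.Chars.findFrom cs ['{'] (pos : Int) = -1
      · exact Or.inl hon
      · refine Or.inr ?_
        have hno : ¬ (PySem.Chars.findFrom cs ['}'] (pos : Int) = -1 ∨
            PySem.Chars.findFrom cs ['{'] (pos : Int) < PySem.Chars.findFrom cs ['}'] (pos : Int)) :=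
          fun h => h2' ⟨hon, h⟩
        push_neg at hno
        omega
    rw [pvHop, dif_neg h1', dif_neg h2', if_neg hret]
    rw [pvClose_step cs pos hpos hcne hfirst d st]
    rw [show pvBreak ('}' :: cs.drop ((PySem.Chars.findFrom cs ['}'] (pos : Int)).toNat + 1))
        ((PySem.Chars.findFrom cs ['}'] (pos : Int)).toNat) d st
        = pvBreak (cs.drop ((PySem.Chars.findFrom cs ['}'] (pos : Int)).toNat + 1))
            ((PySem.Chars.findFrom cs ['}'] (pos : Int)).toNat + 1) (d - 1) st by
      simp [pvBreak, hret]]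
    exact ih

-- ===== VERDICT (by name: the statement is the Claim_ definition above) =====
theorem extract_block_py_spec : Claim_equal_extract_block_py := by
  intro content _
  unfold Spec_extract_block_py extract_block_py extract_block_py_alt
  rw [pvHop_eq_break content.toList 0 (Nat.zero_le _) 0 false]
  rw [pvLoopA_eq_break]
  simp only [List.drop_zero]
  cases hb : pvBreak content.toList 0 0 false with
  | none => simp
  | some j =>
    have hj : 0 < j := pvBreak_false_lt _ _ _ _ hb
    simp only [Option.getD_some]
    rw [if_pos (by omega)]
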